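-- pv_equiv track=rewrite | github.com/fyulingi/RL_project | strategy/improved_mentor.py | get_linstr
-- ===== SOURCE A (Python) =====
-- def get_linstr(board, i, j, dir, color):
--     res = ''
--     if dir == 0:  # horizontal
--         for y in range(15):
--             stone = board[i * 15 + y]
--             if stone == 0:
--                 res += '0'
--             elif stone == color:
--                 res += '2'
--             else:
--                 res += '1'
--     elif dir == 1:  # vertical
--         for x in range(15):
--             stone = board[x * 15 + j]
--             if stone == 0:
--                 res += '0'
--             elif stone == color:
--                 res += '2'
--             else:
--                 res += '1'
--     elif dir == 2:  # diagonal
--         if j >= i: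
--             for x in range(15 + i - j):
--                 stone = board[x * 15 + x + j - i]
--                 if stone == 0:
--                     res += '0'
--                 elif stone == color:
--                     res += '2'
--                 else:
--                     res += '1'
--         else:
--             for x in range(i - j, 15):
--                 stone = board[x * 15 + x + j - i]
--                 if stone == 0:
--                     res += '0'
--                 elif stone == color:
--                     res += '2'
--                 else:
--                     res += '1'
--     elif dir == 3:  # counter diagonal
--         if i + j <= 14:
--             for x in range(i + j + 1):
--                 stone = board[x * 15 + i + j - x]
--                 if stone == 0:
--                     res += '0'
--                 elif stone == color:
--                     res += '2'
--                 else: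
--                     res += '1'
--         else:
--             for x in range(i + j - 14, 15):
--                 stone = board[x * 15 + i + j - x]
--                 if stone == 0:
--                     res += '0'
--                 elif stone == color:
--                     res += '2'
--                 else:
--                     res += '1'
--     return res
-- ===== SOURCE B (Python) =====
-- def get_linstr(board, i, j, dir, color):
--     # Encode the WHOLE board once, then pick the line's characters by a
--     # step-range of flat indices (no per-line encoding loop).
--     enc = ''.join('0' if s == 0 else '2' if s == color else '1' for s in board)
--     if dir == 0:
--         picks = range(15 * i, 15 * i + 15)
--     elif dir == 1:
--         picks = range(j, j + 225, 15)
--     elif dir == 2: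
--         d = j - i
--         picks = range(d, 240 - 15 * d, 16) if d >= 0 else range(-15 * d, 240 + d, 16)
--     elif dir == 3:
--         s = i + j
--         picks = range(s, 15 * s + 14, 14) if s <= 14 else range(15 * s - 196, s + 210, 14)
--     else:
--         picks = ()
--     return ''.join(enc[t] for t in picks)
-- ===== Notes on version B (the rewrite author's own statement) =====
-- stated objective: alternative
-- what changed: B encodes the entire board into one digit string in a single index-free pass over the board itself, then selects the requested line purely by a step-range of flat indices into that pre-encoded string; A instead walks only the line's cells with four copied loops that interleave index arithmetic and per-cell encoding.
import Mathlib
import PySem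

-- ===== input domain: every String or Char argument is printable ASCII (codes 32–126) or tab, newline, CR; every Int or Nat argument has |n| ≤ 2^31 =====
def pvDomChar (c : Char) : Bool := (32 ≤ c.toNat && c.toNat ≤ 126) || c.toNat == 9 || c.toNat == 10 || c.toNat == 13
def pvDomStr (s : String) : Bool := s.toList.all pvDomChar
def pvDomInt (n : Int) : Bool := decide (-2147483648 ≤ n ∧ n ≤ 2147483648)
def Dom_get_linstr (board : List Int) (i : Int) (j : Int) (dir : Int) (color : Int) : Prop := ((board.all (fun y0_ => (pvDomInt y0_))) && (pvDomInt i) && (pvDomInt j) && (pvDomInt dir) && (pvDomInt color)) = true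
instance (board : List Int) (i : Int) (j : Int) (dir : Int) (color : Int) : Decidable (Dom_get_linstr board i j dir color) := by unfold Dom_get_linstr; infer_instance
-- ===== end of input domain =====

-- ===== PORT A =====
-- B encodes the whole board into one digit string first and then selects the line by a
-- step-range of flat indices; A walks only the line with four copied encode-loops (objective: alternative).
def get_linstr (board : List Int) (i : Int) (j : Int) (dir : Int) (color : Int) : String :=
  let res : String := ""
  if dir = 0 then
    (PySem.List.pyRange 0 15 1).foldl (fun res y =>
      let stone := PySem.List.pyGetD board (i * 15 + y) 0
      if stone = 0 then res ++ "0" else if stone = color then res ++ "2" else res ++ "1") res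
  else if dir = 1 then
    (PySem.List.pyRange 0 15 1).foldl (fun res x =>
      let stone := PySem.List.pyGetD board (x * 15 + j) 0
      if stone = 0 then res ++ "0" else if stone = color then res ++ "2" else res ++ "1") res
  else if dir = 2 then
    if j ≥ i then
      (PySem.List.pyRange 0 (15 + i - j) 1).foldl (fun res x =>
        let stone := PySem.List.pyGetD board (x * 15 + x + j - i) 0
        if stone = 0 then res ++ "0" else if stone = color then res ++ "2" else res ++ "1") res
    else
      (PySem.List.pyRange (i - j) 15 1).foldl (fun res x =>
        let stone := PySem.List.pyGetD board (x * 15 + x + j - i) 0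
        if stone = 0 then res ++ "0" else if stone = color then res ++ "2" else res ++ "1") res
  else if dir = 3 then
    if i + j ≤ 14 then
      (PySem.List.pyRange 0 (i + j + 1) 1).foldl (fun res x =>
        let stone := PySem.List.pyGetD board (x * 15 + i + j - x) 0
        if stone = 0 then res ++ "0" else if stone = color then res ++ "2" else res ++ "1") res
    else
      (PySem.List.pyRange (i + j - 14) 15 1).foldl (fun res x =>
        let stone := PySem.List.pyGetD board (x * 15 + i + j - x) 0
        if stone = 0 then res ++ "0" else if stone = color then res ++ "2" else res ++ "1") res
  else res

-- ===== PORT B =====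
-- enc = ''.join(map) is ported as the List Char of the mapped one-char encodings;
-- enc[t] (Python string indexing, negative wrap) is PySem.List.pyGetD on that char list
-- (exact under Pre_, which puts every read index in range).
def get_linstr_alt (board : List Int) (i : Int) (j : Int) (dir : Int) (color : Int) : String :=
  let enc : List Char := board.map (fun s => if s = 0 then '0' else if s = color then '2' else '1')
  let picks : List Int :=
    if dir = 0 then PySem.List.pyRange (15 * i) (15 * i + 15) 1
    else if dir = 1 then PySem.List.pyRange j (j + 225) 15
    else if dir = 2 then
      let d := j - i
      if d ≥ 0 then PySem.List.pyRange d (240 - 15 * d) 16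
      else PySem.List.pyRange (-15 * d) (240 + d) 16
    else if dir = 3 then
      let s := i + j
      if s ≤ 14 then PySem.List.pyRange s (15 * s + 14) 14
      else PySem.List.pyRange (15 * s - 196) (s + 210) 14
    else []
  String.ofList (picks.map (fun t => PySem.List.pyGetD enc t '?'))

-- ===== PRECONDITION & SPEC =====
-- the indices A reads along the requested line (bounds only; no output is computed)
def pvLineIdx (i : Int) (j : Int) (dir : Int) : List Int :=
  if dir = 0 then (PySem.List.pyRange 0 15 1).map (fun y => i * 15 + y)
  else if dir = 1 then (PySem.List.pyRange 0 15 1).map (fun x => x * 15 + j)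
  else if dir = 2 then
    (PySem.List.pyRange (if j ≥ i then 0 else i - j) (if j ≥ i then 15 + i - j else 15) 1).map
      (fun x => x * 15 + x + j - i)
  else if dir = 3 then
    (PySem.List.pyRange (if i + j ≤ 14 then 0 else i + j - 14) (if i + j ≤ 14 then i + j + 1 else 15) 1).map
      (fun x => x * 15 + i + j - x)
  else []

-- Pre_ excludes exactly the inputs on which Python A raises IndexError: some index read along the
-- requested line falls outside [-len(board), len(board)).
def Pre_get_linstr (board : List Int) (i : Int) (j : Int) (dir : Int) (color : Int) : Prop :=
  ∀ t ∈ pvLineIdx i j dir, PySem.Raise.InRange board.length t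
instance (board : List Int) (i : Int) (j : Int) (dir : Int) (color : Int) : Decidable (Pre_get_linstr board i j dir color) := by unfold Pre_get_linstr; infer_instance

def pvWitness_get_linstr : List Int × Int × Int × Int × Int := (List.replicate 15 0, 0, 0, 0, 1)

def Spec_get_linstr (board : List Int) (i : Int) (j : Int) (dir : Int) (color : Int) (out : String) : Prop := out = get_linstr_alt board i j dir color
instance (board : List Int) (i : Int) (j : Int) (dir : Int) (color : Int) (out : String) : Decidable (Spec_get_linstr board i j dir color out) := by unfold Spec_get_linstr; infer_instance

-- ===== CLAIM (what is proved, stated in full; the proofs are below) =====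
def Claim_equal_get_linstr : Prop := ∀ (board : List Int) (i : Int) (j : Int) (dir : Int) (color : Int), Dom_get_linstr board i j dir color → Pre_get_linstr board i j dir color → Spec_get_linstr board i j dir color (get_linstr board i j dir color)

-- ===== LEMMAS AND PROOFS =====
theorem join_nil_flatten (l : List (List Char)) : PySem.Chars.join [] l = l.flatten := by
  simp only [PySem.Chars.join, List.intercalate]
  induction l with
  | nil => rfl
  | cons a t ih => cases t <;> simp_all [List.intersperse]

-- accumulating 'res += piece(x)' over a list is the join of the pieces
theorem foldl_enc (f : Int → String) (l : List Int) (acc : String) :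
    l.foldl (fun r x => r ++ f x) acc = acc ++ PySem.Str.join "" (l.map f) := by
  apply String.toList_inj.mp
  induction l generalizing acc with
  | nil => simp [PySem.Str.join]
  | cons a t ih => simp_all [join_nil_flatten]

-- A's branching accumulation is 'res ++ <encoded char>'
theorem body_eq (board : List Int) (color : Int) (g : Int → Int) :
    (fun (res : String) (x : Int) =>
      let stone := PySem.List.pyGetD board (g x) 0
      if stone = 0 then res ++ "0" else if stone = color then res ++ "2" else res ++ "1")
    = (fun (res : String) (x : Int) => res ++
      (let s := PySem.List.pyGetD board (g x) 0
       if s = 0 then "0" else if s = color then "2" else "1")) := by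
  funext res x
  simp only []
  split_ifs <;> rfl

-- an arithmetic step-range is the unit range reindexed
theorem pyRange_step_map (lo hi d s : Int) (hs : 0 < s) :
    PySem.List.pyRange (d + s * lo) (d + s * hi) s
      = (PySem.List.pyRange lo hi 1).map (fun x => d + s * x) := by
  rw [PySem.List.pyRange_of_pos _ _ hs, PySem.List.pyRange_one, List.map_map]
  have hcnt : (if d + s * lo < d + s * hi then ((d + s * hi - (d + s * lo) + s - 1) / s).toNat else 0)
      = (hi - lo).toNat := by
    by_cases h : lo < hi
    · have hlt : d + s * lo < d + s * hi := by nlinarith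
      rw [if_pos hlt]
      have : d + s * hi - (d + s * lo) + s - 1 = (s - 1) + (hi - lo) * s := by ring
      rw [this, Int.add_mul_ediv_right _ _ (by omega : s ≠ 0),
        Int.ediv_eq_zero_of_lt (by omega) (by omega)]
      omega
    · have hnlt : ¬ d + s * lo < d + s * hi := by nlinarith
      rw [if_neg hnlt]; omega
  rw [hcnt]
  apply List.map_congr_left
  intro k _
  simp only [Function.comp]
  ring

-- reading a mapped list at an in-range (possibly negative) index
theorem pyGetD_map_inrange {α β : Type} (f : α → β) (xs : List α) (t : Int) (d : β) (d' : α)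
    (h : PySem.Raise.InRange xs.length t) :
    PySem.List.pyGetD (xs.map f) t d = f (PySem.List.pyGetD xs t d') := by
  obtain ⟨h1, h2⟩ := h
  simp only [PySem.List.pyGetD, PySem.List.pyGet?, PySem.List.pyIdx?, List.length_map]
  by_cases hp : 0 ≤ t
  · rw [if_pos hp, if_pos h2]
    have hlt : t.toNat < xs.length := by omega
    simp [List.getElem?_eq_getElem hlt]
  · rw [if_neg hp, if_pos h1]
    have hlt : xs.length - (-t).toNat < xs.length := by omega
    simp [List.getElem?_eq_getElem hlt]

-- a flatMap of singletons is a map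
theorem flatMap_eq_map {l : List Int} {F : Int → List Char} {G : Int → Char}
    (h : ∀ x ∈ l, F x = [G x]) : l.flatMap F = l.map G := by
  induction l with
  | nil => rfl
  | cons a t ih => simp_all

-- one branch: A's encode-loop over the line equals B's pick of the pre-encoded board
theorem branch_eq (board : List Int) (color lo hi d s a b : Int) (hs : 0 < s)
    (ha : a = d + s * lo) (hb : b = d + s * hi) (g : Int → Int)
    (hg : ∀ x, g x = d + s * x)
    (hpre : ∀ x ∈ PySem.List.pyRange lo hi 1, PySem.Raise.InRange board.length (g x)) :
    (PySem.List.pyRange lo hi 1).foldl (fun res x =>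
        let stone := PySem.List.pyGetD board (g x) 0
        if stone = 0 then res ++ "0" else if stone = color then res ++ "2" else res ++ "1") ""
      = String.ofList ((PySem.List.pyRange a b s).map
          (fun t => PySem.List.pyGetD
            (board.map (fun v => if v = 0 then '0' else if v = color then '2' else '1')) t '?')) := by
  subst ha hb
  rw [body_eq board color g, foldl_enc, pyRange_step_map lo hi d s hs, List.map_map]
  apply String.toList_inj.mp
  simp only [PySem.Str.join, String.toList_ofList, join_nil_flatten, List.map_map,
    String.toList_append, String.toList_empty, List.nil_append]
  rw [← List.flatMap_def]
  apply flatMap_eq_map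
  intro x hx
  have hin : PySem.Raise.InRange board.length (g x) := hpre x hx
  simp only [Function.comp]
  rw [pyGetD_map_inrange _ board (d + s * x) '?' 0 (by rw [← hg x]; exact hin), ← hg x]
  split_ifs <;> rfl

theorem get_linstr_spec : Claim_equal_get_linstr := by
  unfold Claim_equal_get_linstr
  intro board i j dir color _ hpre
  unfold Spec_get_linstr get_linstr get_linstr_alt
  unfold Pre_get_linstr at hpre
  unfold pvLineIdx at hpre
  by_cases h0 : dir = 0
  · simp only [h0, reduceIte] at hpre ⊢
    exact branch_eq board color 0 15 (15 * i) 1 (15 * i) (15 * i + 15) (by omega)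
      (by ring) (by ring) (fun y => i * 15 + y) (fun x => by ring)
      (fun x hx => hpre _ (List.mem_map_of_mem hx))
  by_cases h1 : dir = 1
  · simp only [h1, reduceIte] at hpre ⊢
    exact branch_eq board color 0 15 j 15 j (j + 225) (by omega)
      (by ring) (by ring) (fun x => x * 15 + j) (fun x => by ring)
      (fun x hx => hpre _ (List.mem_map_of_mem hx))
  by_cases h2 : dir = 2
  · simp only [h2, reduceIte] at hpre ⊢
    by_cases hji : j ≥ i
    · have hd : j - i ≥ 0 := by omega
      simp only [hji, hd, reduceIte] at hpre ⊢
      exact branch_eq board color 0 (15 + i - j) (j - i) 16 (j - i) (240 - 15 * (j - i)) (by omega)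
        (by ring) (by ring) (fun x => x * 15 + x + j - i) (fun x => by ring)
        (fun x hx => hpre _ (List.mem_map_of_mem hx))
    · have hd : ¬ (j - i ≥ 0) := by omega
      simp only [hji, hd, reduceIte] at hpre ⊢
      exact branch_eq board color (i - j) 15 (j - i) 16 (-15 * (j - i)) (240 + (j - i)) (by omega)
        (by ring) (by ring) (fun x => x * 15 + x + j - i) (fun x => by ring)
        (fun x hx => hpre _ (List.mem_map_of_mem hx))
  by_cases h3 : dir = 3
  · simp only [h3, reduceIte] at hpre ⊢
    by_cases hij : i + j ≤ 14
    · simp only [hij, reduceIte] at hpre ⊢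
      exact branch_eq board color 0 (i + j + 1) (i + j) 14 (i + j) (15 * (i + j) + 14) (by omega)
        (by ring) (by ring) (fun x => x * 15 + i + j - x) (fun x => by ring)
        (fun x hx => hpre _ (List.mem_map_of_mem hx))
    · simp only [hij, reduceIte] at hpre ⊢
      exact branch_eq board color (i + j - 14) 15 (i + j) 14 (15 * (i + j) - 196) ((i + j) + 210) (by omega)
        (by ring) (by ring) (fun x => x * 15 + i + j - x) (fun x => by ring)
        (fun x hx => hpre _ (List.mem_map_of_mem hx))
  · simp only [h0, h1, h2, h3, reduceIte]
    rfl
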